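-- pv_equiv track=rewrite | github.com/ajmarin/coding | leetcode/03833_count_dominant_indices.py | dominantIndices
-- ===== SOURCE A (Python) =====
-- from typing import List
--
-- def dominantIndices(nums: List[int]) -> int:
--     add = nums[-1]
--     ans = 0
--     for i in range(1, len(nums)):
--         n = nums[~i]
--         ans += i * n > add
--         add += n
--     return ans
-- ===== SOURCE B (Python) =====
-- from typing import List
--
-- def dominantIndices(nums: List[int]) -> int:
--     # Build a suffix-sum table first (suf[i] = sum of elements after index i),
--     # then count in a separate pass.
--     suf = []
--     s = 0
--     for x in reversed(nums):
--         suf.append(s)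
--         s += x
--     suf.reverse()
--     n = len(nums)
--     return sum(x * (n - 1 - i) > suf[i] for i, x in enumerate(nums))
-- ===== Notes on version B (the rewrite author's own statement) =====
-- stated objective: alternative
-- what changed: A streams right-to-left with a single accumulator updated in the same loop that counts; B first materializes an explicit suffix-sum table in one pass and then counts qualifying indices in a separate left-to-right enumeration pass.
import Mathlib
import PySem

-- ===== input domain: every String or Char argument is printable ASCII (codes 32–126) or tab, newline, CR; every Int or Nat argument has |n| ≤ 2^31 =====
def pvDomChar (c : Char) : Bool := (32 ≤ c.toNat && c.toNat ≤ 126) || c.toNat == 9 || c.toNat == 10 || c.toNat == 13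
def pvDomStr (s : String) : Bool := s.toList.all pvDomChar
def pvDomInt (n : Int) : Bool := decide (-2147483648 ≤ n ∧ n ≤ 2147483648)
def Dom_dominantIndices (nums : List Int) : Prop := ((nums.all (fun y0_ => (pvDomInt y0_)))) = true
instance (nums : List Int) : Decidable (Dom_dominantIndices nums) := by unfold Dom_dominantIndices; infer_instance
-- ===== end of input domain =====

-- B replaces A's single right-to-left streaming accumulator with an explicit suffix-sum
-- table built first, followed by a separate counting pass (objective: alternative).

-- ===== PORT A =====
-- A's loop body: n = nums[~i] (= nums[-(i+1)]); ans += i*n > add; add += n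
def dominantIndices (nums : List Int) : Int :=
  match PySem.List.pyGet? nums (-1) with
  | none => 0   -- Python raises IndexError here; excluded by Pre_
  | some add0 =>
    ((PySem.List.pyRange 1 (nums.length : Int) 1).foldl
      (fun (st : Int × Int) i =>
        match PySem.List.pyGet? nums (-(i + 1)) with
        | none => st   -- unreachable for i in range(1, len)
        | some n => (st.1 + (if i * n > st.2 then (1 : Int) else 0), st.2 + n))
      (0, add0)).1

-- ===== PORT B =====
def dominantIndices_alt (nums : List Int) : Int :=
  let p := nums.reverse.foldl
    (fun (acc : List Int × Int) x => (acc.1 ++ [acc.2], acc.2 + x)) ([], 0)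
  let suf := p.1.reverse
  let n : Int := (nums.length : Int)
  ((PySem.List.enumerate nums 0).map
    (fun ix => if ix.2 * (n - 1 - ix.1) > PySem.List.pyGetD suf ix.1 0 then (1 : Int) else 0)).sum

-- ===== PRECONDITION & SPEC =====
-- Pre_ excludes only the empty list, on which Python A raises IndexError (nums[-1]).
def Pre_dominantIndices (nums : List Int) : Prop := nums ≠ []
instance (nums : List Int) : Decidable (Pre_dominantIndices nums) := by
  unfold Pre_dominantIndices; infer_instance
def pvWitness_dominantIndices : List Int := [3, 1, 2]

def Spec_dominantIndices (nums : List Int) (out : Int) : Prop := out = dominantIndices_alt nums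
instance (nums : List Int) (out : Int) : Decidable (Spec_dominantIndices nums out) := by
  unfold Spec_dominantIndices; infer_instance

-- ===== CLAIM (what is proved, stated in full; the proofs are below) =====
def Claim_equal_dominantIndices : Prop := ∀ (nums : List Int), Dom_dominantIndices nums → Pre_dominantIndices nums → Spec_dominantIndices nums (dominantIndices nums)

-- ===== LEMMAS AND PROOFS =====

-- Reference count over the REVERSED list: refC r i s counts positions k (from index i,
-- running sum s) with (i+k) * r[k] > s + sum of r's first k elements.
def refC : List Int → Int → Int → Int
  | [], _, _ => 0
  | x :: t, i, s => (if i * x > s then 1 else 0) + refC t (i + 1) (s + x)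

-- A's fold over range(j, n) equals refC on the dropped reversed list.
lemma foldA (nums : List Int) : ∀ (d : List Int) (j : Nat) (ans add : Int),
    nums.reverse.drop j = d →
    ((PySem.List.pyRange (j : Int) (nums.length : Int) 1).foldl
      (fun (st : Int × Int) i =>
        match PySem.List.pyGet? nums (-(i + 1)) with
        | none => st
        | some n => (st.1 + (if i * n > st.2 then (1 : Int) else 0), st.2 + n))
      (ans, add)) = (ans + refC d j add, add + d.sum) := by
  intro d
  induction d with
  | nil =>
    intro j ans add h
    rw [List.drop_eq_nil_iff] at h
    simp only [List.length_reverse] at h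
    rw [PySem.List.pyRange_one_eq_nil (by exact_mod_cast h)]
    simp [refC]
  | cons x t ih =>
    intro j ans add h
    have hj : j < nums.length := by
      by_contra hge
      rw [not_lt] at hge
      have hnil : nums.reverse.drop j = [] := by
        rw [List.drop_eq_nil_iff]; simpa using hge
      simp [hnil] at h
    have hx : nums[nums.length - (j + 1)]? = some x := by
      have h0 : nums.reverse[j]? = some x := by
        have h1 := List.getElem?_drop (xs := nums.reverse) (i := j) (j := 0)
        rw [h] at h1; simpa using h1.symm
      rw [List.getElem?_reverse (by simpa using hj)] at h0
      rw [show nums.length - (j + 1) = nums.length - 1 - j from by omega]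
      exact h0
    have hget : PySem.List.pyGet? nums (-((j : Int) + 1)) = some x := by
      have h2 := PySem.List.pyGet?_neg_natCast nums (j + 1) (by omega) (by omega)
      rw [show (-((j : Int) + 1)) = -((((j + 1) : Nat)) : Int) by push_cast; ring, h2, hx]
    rw [PySem.List.pyRange_one_cons (by exact_mod_cast hj)]
    simp only [List.foldl_cons, hget]
    have ht : nums.reverse.drop (j + 1) = t := by
      have h3 := List.drop_drop (i := 1) (j := j) (l := nums.reverse)
      rw [h3.symm, h]
      rfl
    have h4 := ih (j + 1) (ans + if (j : Int) * x > add then 1 else 0) (add + x) ht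
    rw [show ((j : Int) + 1) = (((j + 1 : Nat)) : Int) by push_cast; ring, h4]
    simp only [refC, List.sum_cons]
    refine Prod.ext (by push_cast; ring) (by push_cast; ring)

-- refC as a sum over indices.
lemma refC_sum (r : List Int) : ∀ (j s : Int),
    refC r j s =
      ((List.range r.length).map
        (fun (k : Nat) => if (j + (k : Int)) * r.getD k 0 > s + (r.take k).sum then (1 : Int) else 0)).sum := by
  induction r with
  | nil => intro j s; simp [refC]
  | cons x t ih =>
    intro j s
    simp only [refC, List.length_cons, List.range_succ_eq_map, List.map_cons, List.map_map,
      List.sum_cons, List.take_zero, List.sum_nil]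
    rw [ih (j + 1) (s + x)]
    congr 1
    · norm_num
    congr 1
    apply List.map_congr_left; intro k _
    simp only [Function.comp, Nat.succ_eq_add_one, List.take_succ_cons, List.getD_cons_succ,
      List.sum_cons, Nat.cast_add, Nat.cast_one]
    congr 2
    · ring
    · ring

-- B's table fold builds the prefix sums of the reversed list.
lemma foldB : ∀ (r : List Int) (l0 : List Int) (s0 : Int),
    r.foldl (fun (acc : List Int × Int) x => (acc.1 ++ [acc.2], acc.2 + x)) (l0, s0)
      = (l0 ++ (List.range r.length).map (fun k => s0 + (r.take k).sum), s0 + r.sum) := by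
  intro r
  induction r with
  | nil => intro l0 s0; simp
  | cons x t ih =>
    intro l0 s0
    simp only [List.foldl_cons, ih, List.length_cons, List.range_succ_eq_map, List.map_cons,
      List.map_map, List.sum_cons, List.take_zero, List.sum_nil]
    refine Prod.ext ?_ (by ring)
    show l0 ++ [s0] ++ _ = l0 ++ (s0 + 0) :: _
    rw [List.append_assoc, add_zero, List.singleton_append]
    congr 2
    apply List.map_congr_left; intro k _
    simp [Function.comp, Nat.succ_eq_add_one, List.take_succ_cons]; ring

-- list-sum over range as a Finset sum (no Mathlib lemma states exactly this; it is definitional)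
lemma sum_map_range_eq_finset (f : Nat → Int) (n : Nat) :
    ((List.range n).map f).sum = ∑ i ∈ Finset.range n, f i := rfl

lemma altEq (nums : List Int) : dominantIndices_alt nums = refC nums.reverse 0 0 := by
  simp only [dominantIndices_alt]
  rw [foldB nums.reverse [] 0]
  rw [PySem.List.enumerate_eq_map_pyRange nums (0 : Int)]
  simp only [PySem.List.len_eq, PySem.List.pyRange_zero_nat, List.map_map, List.nil_append]
  rw [refC_sum]
  simp only [List.length_reverse]
  rw [sum_map_range_eq_finset, sum_map_range_eq_finset]
  conv_rhs => rw [← Finset.sum_range_reflect]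
  refine Finset.sum_congr rfl ?_
  intro i hi
  rw [Finset.mem_range] at hi
  simp only [Function.comp_apply]
  have e1 : PySem.List.pyGetD nums (i : Int) 0 = nums.reverse.getD (nums.length - 1 - i) 0 := by
    rw [PySem.List.pyGetD_natCast, List.getD_eq_getElem?_getD, List.getD_eq_getElem?_getD,
      List.getElem?_reverse (by omega : nums.length - 1 - i < nums.length),
      show nums.length - 1 - (nums.length - 1 - i) = i from by omega]
  have e2 : ((nums.length : Int) - 1 - (i : Int)) = ((nums.length - 1 - i : Nat) : Int) := by
    omega
  have e3 : PySem.List.pyGetD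
      ((List.map (fun k => 0 + (nums.reverse.take k).sum) (List.range nums.length)).reverse)
      (i : Int) 0 = 0 + (nums.reverse.take (nums.length - 1 - i)).sum := by
    rw [PySem.List.pyGetD_natCast, List.getD_eq_getElem?_getD,
      List.getElem?_reverse (by simpa using hi),
      List.getElem?_map]
    simp only [List.length_map, List.length_range]
    rw [List.getElem?_range (by omega : nums.length - 1 - i < nums.length)]
    rfl
  simp only [e1, e2, e3]
  refine if_congr ?_ rfl rfl
  constructor <;> intro hlt <;>
    linarith [mul_comm (nums.reverse.getD (nums.length - 1 - i) 0) ((nums.length - 1 - i : Nat) : Int)]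

lemma aEq (nums : List Int) (h : nums ≠ []) : dominantIndices nums = refC nums.reverse 0 0 := by
  obtain ⟨a, t, hr⟩ := List.exists_cons_of_ne_nil (by simpa using h : nums.reverse ≠ [])
  have hlast : PySem.List.pyGet? nums (-1) = some a := by
    rw [PySem.List.pyGet?_neg_one, ← List.head?_reverse, hr]; rfl
  simp only [dominantIndices, hlast]
  have h1 := foldA nums t 1 0 a (by rw [hr]; rfl)
  rw [show (1 : Int) = ((1 : Nat) : Int) from rfl] at h1 ⊢
  rw [h1, hr]
  simp [refC]

-- ===== VERDICT (by name: the statement is the Claim_ definition above) =====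
theorem dominantIndices_spec : Claim_equal_dominantIndices := by
  intro nums _ hpre
  unfold Spec_dominantIndices
  rw [aEq nums hpre, altEq nums]
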